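-- pv_equiv track=rewrite | github.com/JordanGunn/agent-slop-lint | scripts/research/composition_poc/poc1b_affix_polymorphism_diagnostic.py | aggregate_by_alphabet
-- ===== SOURCE A (Python) =====
-- from collections import defaultdict
--
-- def aggregate_by_alphabet(groups, min_alphabet=3):
--     """Group patterns by their type alphabet.
--
--     Two patterns sharing >=2 alphabet tokens belong to the same
--     underlying entity. e.g., ``*_name_extractor`` over {c, cpp, julia,
--     ruby} and ``*_is_function_node`` over {julia, ruby} share an
--     underlying ``language`` entity.
--     """
--     raw_patterns = []
--     for (stem, pos), variants in groups.items():
--         if len(variants) >= min_alphabet: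
--             raw_patterns.append((stem, pos, variants))
--
--     if not raw_patterns:
--         return []
--
--     # Cluster patterns by alphabet overlap (transitive)
--     parent = list(range(len(raw_patterns)))
--     def find(x):
--         while parent[x] != x:
--             parent[x] = parent[parent[x]]
--             x = parent[x]
--         return x
--     def union(x, y):
--         parent[find(x)] = find(y)
--
--     for i in range(len(raw_patterns)):
--         ai = set(raw_patterns[i][2].keys())
--         for j in range(i + 1, len(raw_patterns)):
--             aj = set(raw_patterns[j][2].keys())
--             if len(ai & aj) >= 2:
--                 union(i, j)
--
--     clusters = defaultdict(list)
--     for i, p in enumerate(raw_patterns):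
--         clusters[find(i)].append(p)
--
--     return list(clusters.values())
-- ===== SOURCE B (Python) =====
-- def aggregate_by_alphabet(groups, min_alphabet=3):
--     """Flat label-array clustering (relabel-to-representative) instead of union-find."""
--     raw = [(stem, pos, variants)
--            for (stem, pos), variants in groups.items()
--            if len(variants) >= min_alphabet]
--     n = len(raw)
--     keys = [set(v.keys()) for _, _, v in raw]
--     label = list(range(n))
--     for i in range(n):
--         for j in range(i + 1, n):
--             if len(keys[i] & keys[j]) >= 2:
--                 li, lj = label[i], label[j]
--                 if li != lj:
--                     label = [li if l == lj else l for l in label]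
--     out = {}
--     for i in range(n):
--         out.setdefault(label[i], []).append(raw[i])
--     return list(out.values())
-- ===== Notes on version B (the rewrite author's own statement) =====
-- stated objective: alternative
-- what changed: Replaces the path-compressing union-find (parent array with find/union and mutation during queries) by a flat label array that is globally relabelled on each merge, with per-pattern key sets precomputed once instead of being rebuilt in the inner loop.
import Mathlib
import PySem

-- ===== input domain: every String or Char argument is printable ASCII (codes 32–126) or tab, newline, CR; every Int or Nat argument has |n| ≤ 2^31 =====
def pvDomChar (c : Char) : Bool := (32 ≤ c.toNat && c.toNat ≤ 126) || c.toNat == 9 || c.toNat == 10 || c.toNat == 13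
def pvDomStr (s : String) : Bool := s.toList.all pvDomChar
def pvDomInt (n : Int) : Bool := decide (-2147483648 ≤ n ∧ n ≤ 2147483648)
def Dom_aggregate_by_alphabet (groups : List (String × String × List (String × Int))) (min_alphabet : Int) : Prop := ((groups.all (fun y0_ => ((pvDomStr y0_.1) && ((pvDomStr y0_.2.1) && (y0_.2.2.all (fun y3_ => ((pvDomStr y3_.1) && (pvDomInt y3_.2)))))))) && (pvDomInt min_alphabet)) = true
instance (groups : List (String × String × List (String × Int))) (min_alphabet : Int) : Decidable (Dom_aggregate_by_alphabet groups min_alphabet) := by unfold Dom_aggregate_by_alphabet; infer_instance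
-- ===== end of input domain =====

-- B replaces A's path-compressing union-find by a flat label array relabelled on each merge
-- (alternative algorithm, same asymptotic cost); equivalence of the returned clusterings is proved below.

-- ===== PORT A =====
-- helpers shared by both ports: the Python arguments are a dict {(stem, pos): {token: int}},
-- so the association lists are read with Python-dict semantics (first key position, last value)
def pvItems (groups : List (String × String × List (String × Int))) :
    List ((String × String) × List (String × Int)) :=
  (PySem.Dict.ofList (groups.map (fun g => ((g.1, g.2.1), (PySem.Dict.ofList g.2.2).items)))).items

def pvDfltPat : String × String × List (String × Int) := ("", "", [])

-- set(pattern[2].keys())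
def pvAlpha (r : String × String × List (String × Int)) : PySem.Set String :=
  PySem.Set.ofList (r.2.2.map Prod.fst)

-- A's find: while parent[x] != x: parent[x] = parent[parent[x]]; x = parent[x]
-- (fuel = len(parent); proved sufficient by pvFindLoop_spec below)
def pvFindLoop : Nat → List Nat → Nat → Nat × List Nat
  | 0, p, x => (x, p)
  | fuel+1, p, x =>
    let px := p.getD x 0
    if px = x then (x, p)
    else
      let g := p.getD px 0
      pvFindLoop fuel (p.set x g) g

def pvFind (p : List Nat) (x : Nat) : Nat × List Nat := pvFindLoop p.length p x

-- A's union: parent[find(x)] = find(y)  (RHS find(y) evaluated first, as in Python)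
def pvUnion (p : List Nat) (x y : Nat) : List Nat :=
  let fy := pvFind p y
  let fx := pvFind fy.2 x
  fx.2.set fx.1 fy.1

-- the raw_patterns accumulation loop
def pvRawA (groups : List (String × String × List (String × Int))) (min_alphabet : Int) :
    List (String × String × List (String × Int)) :=
  (pvItems groups).foldl
    (fun acc it => if min_alphabet ≤ (it.2.length : Int)
      then acc ++ [(it.1.1, it.1.2, it.2)] else acc) []

-- the double loop of unions
def pvLoopA (raw : List (String × String × List (String × Int))) : List Nat :=
  (List.range raw.length).foldl (fun p i =>
    let ai := pvAlpha (raw.getD i pvDfltPat)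
    (List.range' (i+1) (raw.length - (i+1))).foldl (fun p j =>
      let aj := pvAlpha (raw.getD j pvDfltPat)
      if 2 ≤ PySem.Set.len (PySem.Set.inter ai aj) then pvUnion p i j else p) p)
    (List.range raw.length)

-- clusters[find(i)].append(p) over enumerate(raw_patterns) (find keeps mutating parent)
def pvClustersA (raw : List (String × String × List (String × Int))) (parent : List Nat) :
    PySem.Dict Nat (List (String × String × List (String × Int))) × List Nat :=
  raw.zipIdx.foldl
    (fun st pi =>
      let f := pvFind st.2 pi.2
      (st.1.modify f.1 [] (· ++ [pi.1]), f.2))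
    (PySem.Dict.empty, parent)

def aggregate_by_alphabet (groups : List (String × String × List (String × Int))) (min_alphabet : Int) :
    List (List (String × String × (List (String × Int)))) :=
  let raw := pvRawA groups min_alphabet
  if raw = [] then []
  else (pvClustersA raw (pvLoopA raw)).1.values

-- ===== PORT B =====
def pvRawB (groups : List (String × String × List (String × Int))) (min_alphabet : Int) :
    List (String × String × List (String × Int)) :=
  ((pvItems groups).filter (fun it => min_alphabet ≤ (it.2.length : Int))).map
    (fun it => (it.1.1, it.1.2, it.2))

-- B's double loop: a flat label array, globally relabelled on each merge
def pvLoopB (keys : List (PySem.Set String)) (n : Nat) : List Nat :=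
  (List.range n).foldl (fun lab i =>
    (List.range' (i+1) (n - (i+1))).foldl (fun lab j =>
      if 2 ≤ PySem.Set.len (PySem.Set.inter (keys.getD i []) (keys.getD j [])) then
        let li := lab.getD i 0
        let lj := lab.getD j 0
        if li ≠ lj then lab.map (fun l => if l = lj then li else l) else lab
      else lab) lab)
    (List.range n)

-- out.setdefault(label[i], []).append(raw[i])
def pvOutB (raw : List (String × String × List (String × Int))) (label : List Nat) :
    PySem.Dict Nat (List (String × String × List (String × Int))) :=
  (List.range raw.length).foldl
    (fun d i =>
      let k := label.getD i 0
      d.insert k (d.getD k [] ++ [raw.getD i pvDfltPat]))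
    PySem.Dict.empty

def aggregate_by_alphabet_alt (groups : List (String × String × List (String × Int))) (min_alphabet : Int) :
    List (List (String × String × (List (String × Int)))) :=
  let raw := pvRawB groups min_alphabet
  let keys := raw.map pvAlpha
  (pvOutB raw (pvLoopB keys raw.length)).values

-- ===== PRECONDITION & SPEC =====
def Spec_aggregate_by_alphabet (groups : List (String × String × List (String × Int))) (min_alphabet : Int) (out : List (List (String × String × (List (String × Int))))) : Prop := out = aggregate_by_alphabet_alt groups min_alphabet
instance (groups : List (String × String × List (String × Int))) (min_alphabet : Int) (out : List (List (String × String × (List (String × Int))))) : Decidable (Spec_aggregate_by_alphabet groups min_alphabet out) := by unfold Spec_aggregate_by_alphabet; infer_instance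

-- ===== CLAIM (what is proved, stated in full; the proofs are below) =====
def Claim_equal_aggregate_by_alphabet : Prop := ∀ (groups : List (String × String × List (String × Int))) (min_alphabet : Int), Dom_aggregate_by_alphabet groups min_alphabet → Spec_aggregate_by_alphabet groups min_alphabet (aggregate_by_alphabet groups min_alphabet)

-- ===== LEMMAS AND PROOFS =====
-- iterate the parent map
def pvIter (p : List Nat) : Nat → Nat → Nat
  | 0, x => x
  | k+1, x => pvIter p k (p.getD x 0)

def pvRoot (p : List Nat) (x : Nat) : Nat := pvIter p p.length x

-- the joint invariant tying A's parent forest to B's label array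
def pvInv (p lab : List Nat) (n : Nat) : Prop :=
  p.length = n ∧ lab.length = n ∧
  (∀ x, x < n → p.getD x 0 < n) ∧
  (∃ d : Nat → Nat, ∀ x, x < n → p.getD x 0 ≠ x → d (p.getD x 0) < d x) ∧
  (∀ x, x < n → lab.getD (p.getD x 0) 0 = lab.getD x 0) ∧
  (∀ x y, x < n → y < n → p.getD x 0 = x → p.getD y 0 = y →
     lab.getD x 0 = lab.getD y 0 → x = y)

theorem pvGetD_set (p : List Nat) (i j v d : Nat) :
    (p.set i v).getD j d = if j = i ∧ i < p.length then v else p.getD j d := by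
  by_cases hj : j < p.length
  · rw [List.getD_eq_getElem _ _ (by simpa using hj), List.getElem_set]
    rcases Decidable.em (i = j) with h | h
    · rw [if_pos h, if_pos ⟨h.symm, by omega⟩]
    · rw [if_neg h, if_neg (by intro hc; exact h hc.1.symm),
          List.getD_eq_getElem _ _ hj]
  · rw [List.getD_eq_default _ _ (by simpa using Nat.le_of_not_lt hj),
        List.getD_eq_default _ _ (Nat.le_of_not_lt hj), if_neg (by intro hc; omega)]

theorem pvIter_succ_right (p : List Nat) (k x : Nat) :
    pvIter p (k+1) x = p.getD (pvIter p k x) 0 := by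
  induction k generalizing x with
  | zero => rfl
  | succ k ih => rw [pvIter, ih, pvIter]

theorem pvIter_lt {p : List Nat} {n : Nat} (h3 : ∀ x, x < n → p.getD x 0 < n)
    {x : Nat} (hx : x < n) (k : Nat) : pvIter p k x < n := by
  induction k generalizing x with
  | zero => exact hx
  | succ k ih => exact ih (h3 x hx)

theorem pvIter_fix {p : List Nat} {r : Nat} (hf : p.getD r 0 = r) (k : Nat) :
    pvIter p k r = r := by
  induction k with
  | zero => rfl
  | succ k ih => rw [pvIter, hf, ih]

theorem pvIter_add (p : List Nat) (a b x : Nat) :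
    pvIter p (a + b) x = pvIter p a (pvIter p b x) := by
  induction b generalizing x with
  | zero => rfl
  | succ b ih => rw [Nat.add_succ, pvIter, pvIter, ih]

theorem pvExistsFix {p lab : List Nat} {n : Nat} (hInv : pvInv p lab n)
    {x : Nat} (hx : x < n) :
    ∃ k, k < n ∧ p.getD (pvIter p k x) 0 = pvIter p k x := by
  obtain ⟨h1, h2, h3, ⟨d, hd⟩, h5, h6⟩ := hInv
  by_contra hcon
  have hnf : ∀ k, k < n → p.getD (pvIter p k x) 0 ≠ pvIter p k x := by
    intro k hk hfix
    exact hcon ⟨k, hk, hfix⟩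
  have hstep : ∀ k, k < n → d (pvIter p (k+1) x) < d (pvIter p k x) := by
    intro k hk
    rw [pvIter_succ_right]
    exact hd _ (pvIter_lt h3 hx k) (hnf k hk)
  have hmono : ∀ a b, a < b → b ≤ n → d (pvIter p b x) < d (pvIter p a x) := by
    intro a b hab hbn
    induction b with
    | zero => omega
    | succ b ih =>
      rcases Nat.lt_or_ge a b with h | h
      · exact lt_trans (hstep b (by omega)) (ih h (by omega))
      · have : a = b := by omega
        subst this
        exact hstep a (by omega)
  have hinj : Function.Injective
      (fun k : Fin (n+1) => (⟨pvIter p k x, pvIter_lt h3 hx k⟩ : Fin n)) := by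
    intro a b hab
    simp only [Fin.mk.injEq] at hab
    rcases lt_trichotomy a.val b.val with h | h | h
    · have hlt := hmono a b h (by omega)
      rw [hab] at hlt
      exact absurd hlt (lt_irrefl _)
    · exact Fin.ext h
    · have hlt := hmono b a h (by omega)
      rw [hab] at hlt
      exact absurd hlt (lt_irrefl _)
  have hcard := Fintype.card_le_of_injective _ hinj
  simp at hcard

theorem pvIter_stable {p lab : List Nat} {n : Nat} (hInv : pvInv p lab n)
    {x : Nat} (hx : x < n) {m : Nat} (hm : n ≤ m + 1) :
    pvIter p m x = pvRoot p x := by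
  have h1 := hInv.1
  obtain ⟨k, hk, hfix⟩ := pvExistsFix hInv hx
  have habs : ∀ m', k ≤ m' → pvIter p m' x = pvIter p k x := by
    intro m' hm'
    have he : m' = (m' - k) + k := by omega
    rw [he, pvIter_add, pvIter_fix hfix]
  rw [pvRoot, habs m (by omega), habs p.length (by omega)]

theorem pvRoot_lt {p lab : List Nat} {n : Nat} (hInv : pvInv p lab n)
    {x : Nat} (hx : x < n) : pvRoot p x < n :=
  pvIter_lt hInv.2.2.1 hx p.length

theorem pvRoot_isFix {p lab : List Nat} {n : Nat} (hInv : pvInv p lab n)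
    {x : Nat} (hx : x < n) :
    p.getD (pvRoot p x) 0 = pvRoot p x := by
  have h := pvIter_succ_right p p.length x
  rw [pvIter_stable hInv hx (m := p.length + 1) (by have := hInv.1; omega)] at h
  exact h.symm

theorem pvRoot_of_fix {p : List Nat} {x : Nat} (hf : p.getD x 0 = x) :
    pvRoot p x = x := pvIter_fix hf _

theorem pvRoot_step {p lab : List Nat} {n : Nat} (hInv : pvInv p lab n)
    {x : Nat} (hx : x < n) :
    pvRoot p (p.getD x 0) = pvRoot p x := by
  have h1 := hInv.1
  have hpe : pvIter p (p.length + 1) x = pvIter p p.length (p.getD x 0) := rfl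
  rw [pvIter_stable hInv hx (m := p.length + 1) (by omega)] at hpe
  rw [pvRoot, ← hpe]

theorem pvRoot_iter {p lab : List Nat} {n : Nat} (hInv : pvInv p lab n)
    {x : Nat} (hx : x < n) (m : Nat) :
    pvRoot p (pvIter p m x) = pvRoot p x := by
  induction m generalizing x with
  | zero => rfl
  | succ m ih =>
    rw [pvIter, ih (hInv.2.2.1 x hx)]
    exact pvRoot_step hInv hx

theorem pvLab_iter {p lab : List Nat} {n : Nat} (hInv : pvInv p lab n)
    {x : Nat} (hx : x < n) (m : Nat) :
    lab.getD (pvIter p m x) 0 = lab.getD x 0 := by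
  induction m generalizing x with
  | zero => rfl
  | succ m ih =>
    rw [pvIter, ih (hInv.2.2.1 x hx)]
    exact hInv.2.2.2.2.1 x hx

theorem pvLab_root {p lab : List Nat} {n : Nat} (hInv : pvInv p lab n)
    {x : Nat} (hx : x < n) :
    lab.getD (pvRoot p x) 0 = lab.getD x 0 := pvLab_iter hInv hx p.length

theorem pvCompress {p lab : List Nat} {n : Nat} (hInv : pvInv p lab n)
    {x : Nat} (hx : x < n) (hnf : p.getD x 0 ≠ x) :
    pvInv (p.set x (p.getD (p.getD x 0) 0)) lab n ∧
    (∀ z, z < n → p.getD z 0 = z → (p.set x (p.getD (p.getD x 0) 0)).getD z 0 = z) := by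
  obtain ⟨h1, h2, h3, ⟨d, hd⟩, h5, h6⟩ := hInv
  set px := p.getD x 0 with hpx
  set g := p.getD px 0 with hg
  have hpxlt : px < n := h3 x hx
  have hglt : g < n := h3 px hpxlt
  have hdg : g ≠ x → d g < d x := by
    intro _
    by_cases hfixpx : p.getD px 0 = px
    · rw [hg, hfixpx]
      exact hd x hx hnf
    · exact lt_trans (hd px hpxlt hfixpx) (hd x hx hnf)
  have hgx : g ≠ x := by
    intro hc
    by_cases hfixpx : p.getD px 0 = px
    · rw [hg, hfixpx] at hc
      exact hnf hc
    · have d1 : d g < d px := hd px hpxlt hfixpx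
      have d2 : d px < d x := hd x hx hnf
      rw [hc] at d1
      omega
  have hget : ∀ z, (p.set x g).getD z 0 = if z = x then g else p.getD z 0 := by
    intro z
    rw [pvGetD_set]
    by_cases hz : z = x
    · rw [if_pos ⟨hz, by omega⟩, if_pos hz]
    · rw [if_neg (by intro hc; exact hz hc.1), if_neg hz]
  refine ⟨⟨by simpa using h1, h2, ?_, ⟨d, ?_⟩, ?_, ?_⟩, ?_⟩
  · intro z hz
    rw [hget]
    split_ifs with h
    · exact hglt
    · exact h3 z hz
  · intro z hz hne
    by_cases h : z = x
    · subst h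
      rw [hget, if_pos rfl] at hne ⊢
      exact hdg hne
    · rw [hget, if_neg h] at hne ⊢
      exact hd z hz hne
  · intro z hz
    by_cases h : z = x
    · subst h
      rw [hget, if_pos rfl]
      calc lab.getD g 0 = lab.getD px 0 := h5 px hpxlt
        _ = lab.getD z 0 := h5 z hz
    · rw [hget, if_neg h]
      exact h5 z hz
  · intro u v hu hv hfu hfv hlab
    by_cases h : u = x
    · rw [hget, if_pos h] at hfu
      subst h
      exact absurd hfu hgx
    · by_cases h' : v = x
      · rw [hget, if_pos h'] at hfv
        subst h'
        exact absurd hfv hgx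
      · rw [hget, if_neg h] at hfu
        rw [hget, if_neg h'] at hfv
        exact h6 u v hu hv hfu hfv hlab
  · intro z hz hfz
    have hzx : z ≠ x := by
      intro hc
      apply hnf
      rw [hpx, ← hc]
      exact hfz
    rw [hget, if_neg hzx]
    exact hfz

theorem pvAvoid {p lab : List Nat} {n : Nat} (hInv : pvInv p lab n)
    {x : Nat} (hx : x < n) (hnf : p.getD x 0 ≠ x) :
    (∀ m, pvIter p m (p.getD (p.getD x 0) 0) ≠ x) ∧
    (∀ m, pvIter (p.set x (p.getD (p.getD x 0) 0)) m (p.getD (p.getD x 0) 0)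
          = pvIter p m (p.getD (p.getD x 0) 0)) := by
  obtain ⟨h1, h2, h3, ⟨d, hd⟩, h5, h6⟩ := hInv
  set px := p.getD x 0 with hpx
  set g := p.getD px 0 with hg
  have hpxlt : px < n := h3 x hx
  have hglt : g < n := h3 px hpxlt
  have hdg : d g < d x := by
    by_cases hfixpx : p.getD px 0 = px
    · rw [hg, hfixpx]
      exact hd x hx hnf
    · exact lt_trans (hd px hpxlt hfixpx) (hd x hx hnf)
  have hQ : ∀ m, d (pvIter p m g) < d x := by
    intro m
    induction m with
    | zero => exact hdg
    | succ m ih =>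
      rw [pvIter_succ_right]
      by_cases hf : p.getD (pvIter p m g) 0 = pvIter p m g
      · rw [hf]; exact ih
      · exact lt_trans (hd _ (pvIter_lt h3 hglt m) hf) ih
  have hne : ∀ m, pvIter p m g ≠ x := by
    intro m hc
    have := hQ m
    rw [hc] at this
    omega
  refine ⟨hne, ?_⟩
  intro m
  induction m with
  | zero => rfl
  | succ m ih =>
    rw [pvIter_succ_right, pvIter_succ_right, ih, pvGetD_set,
        if_neg (by intro hc; exact hne m hc.1)]

theorem pvFindLoop_spec {lab : List Nat} {n : Nat} :
    ∀ (fuel : Nat) (p : List Nat) (x k : Nat), pvInv p lab n → x < n → k < fuel →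
    p.getD (pvIter p k x) 0 = pvIter p k x →
    ∃ p', pvFindLoop fuel p x = (pvRoot p x, p') ∧ pvInv p' lab n ∧
      (∀ z, z < n → p.getD z 0 = z → p'.getD z 0 = z) := by
  intro fuel
  induction fuel with
  | zero => intro p x k _ _ hk _; omega
  | succ f ih =>
    intro p x k hInv hx hk hfix
    by_cases hpx : p.getD x 0 = x
    · refine ⟨p, ?_, hInv, fun z _ h => h⟩
      rw [pvFindLoop]
      simp only [hpx, if_true, pvRoot_of_fix hpx]
    · set px := p.getD x 0 with hpxd
      set g := p.getD px 0 with hgd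
      have hk1 : 1 ≤ k := by
        rcases Nat.eq_zero_or_pos k with h | h
        · subst h; exact absurd hfix hpx
        · exact h
      obtain ⟨hInv1, hfp1⟩ := pvCompress hInv hx hpx
      obtain ⟨hne, htr⟩ := pvAvoid hInv hx hpx
      have h3 := hInv.2.2.1
      have hglt : g < n := h3 px (h3 x hx)
      have hg2 : pvIter p 2 x = g := rfl
      -- find a fix witness for the recursive call
      have hwit : ∃ k1, k1 < f ∧
          (p.set x g).getD (pvIter (p.set x g) k1 g) 0 = pvIter (p.set x g) k1 g := by
        by_cases hpxfix : p.getD px 0 = px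
        · refine ⟨0, by omega, ?_⟩
          have hgpx : g = px := hpxfix
          rw [pvIter, pvGetD_set, if_neg (by intro hc; exact hne 0 hc.1)]
          rw [hgpx]
          exact hpxfix
        · have hk2 : 2 ≤ k := by
            rcases Nat.lt_or_ge k 2 with h | h
            · exfalso
              have hke : k = 1 := by omega
              subst hke
              exact hpxfix (show p.getD px 0 = px from hfix)
            · exact h
          refine ⟨k - 2, by omega, ?_⟩
          have hsplit : pvIter p k x = pvIter p (k-2) g := by
            rw [← hg2, ← pvIter_add]
            congr 1
            omega
          rw [htr, pvGetD_set, if_neg (by intro hc; exact hne (k-2) hc.1)]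
          rw [hsplit] at hfix
          exact hfix
      obtain ⟨k1, hk1f, hfix1⟩ := hwit
      obtain ⟨p', heq, hInv', hfp'⟩ := ih (p.set x g) g k1 hInv1 hglt hk1f hfix1
      refine ⟨p', ?_, hInv', fun z hz hfz => hfp' z hz (hfp1 z hz hfz)⟩
      rw [pvFindLoop]
      simp only [← hpxd, ← hgd, if_neg hpx]
      rw [heq]
      congr 1
      -- pvRoot (p.set x g) g = pvRoot p x
      have hlen : (p.set x g).length = p.length := by simp
      have : pvRoot (p.set x g) g = pvIter p p.length g := by
        rw [pvRoot, hlen, htr]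
      rw [this, ← hg2]
      have := pvRoot_iter hInv hx 2
      rw [← this, pvRoot]

theorem pvFind_spec {p lab : List Nat} {n : Nat} (hInv : pvInv p lab n)
    {x : Nat} (hx : x < n) :
    ∃ p', pvFind p x = (pvRoot p x, p') ∧ pvInv p' lab n ∧
      (∀ z, z < n → p.getD z 0 = z → p'.getD z 0 = z) := by
  obtain ⟨k, hk, hfix⟩ := pvExistsFix hInv hx
  have h1 := hInv.1
  exact pvFindLoop_spec p.length p x k hInv hx (by omega) hfix

theorem pvGetD_map_nat (lab : List Nat) (f : Nat → Nat) {z : Nat} (hz : z < lab.length) :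
    (lab.map f).getD z 0 = f (lab.getD z 0) := by
  rw [List.getD_eq_getElem _ _ (by simpa using hz), List.getElem_map,
      List.getD_eq_getElem _ _ hz]

theorem pvStep {p lab : List Nat} {n : Nat} (hInv : pvInv p lab n)
    {i j : Nat} (hi : i < n) (hj : j < n) :
    pvInv (pvUnion p i j)
      (if lab.getD i 0 ≠ lab.getD j 0
        then lab.map (fun l => if l = lab.getD j 0 then lab.getD i 0 else l)
        else lab) n := by
  obtain ⟨p1, hf1, hInv1, hfp1⟩ := pvFind_spec hInv hj
  obtain ⟨p2, hf2, hInv2, hfp2⟩ := pvFind_spec hInv1 hi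
  have hUeq : pvUnion p i j = p2.set (pvRoot p1 i) (pvRoot p j) := by
    rw [pvUnion, hf1]
    simp only [hf2]
  set ry := pvRoot p j with hryd
  set rx := pvRoot p1 i with hrxd
  have hrylt : ry < n := pvRoot_lt hInv hj
  have hrxlt : rx < n := pvRoot_lt hInv1 hi
  have hryfix2 : p2.getD ry 0 = ry :=
    hfp2 ry hrylt (hfp1 ry hrylt (pvRoot_isFix hInv hj))
  have hrxfix2 : p2.getD rx 0 = rx := hfp2 rx hrxlt (pvRoot_isFix hInv1 hi)
  have hlabry : lab.getD ry 0 = lab.getD j 0 := pvLab_root hInv hj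
  have hlabrx : lab.getD rx 0 = lab.getD i 0 := pvLab_root hInv1 hi
  have hlen2 : p2.length = n := hInv2.1
  by_cases hll : lab.getD i 0 = lab.getD j 0
  · rw [if_neg (by simpa using hll)]
    have hrxry : rx = ry :=
      hInv2.2.2.2.2.2 rx ry hrxlt hrylt hrxfix2 hryfix2 (by rw [hlabrx, hlabry, hll])
    have hset : p2.set rx ry = p2 := by
      have hxlt : rx < p2.length := by omega
      have hg : p2[rx]'hxlt = rx := by
        rw [← List.getD_eq_getElem p2 0 hxlt]
        exact hrxfix2
      conv_lhs => rw [show ry = p2[rx]'hxlt by rw [hg, hrxry]]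
      exact List.set_getElem_self hxlt
    rw [hUeq, hset]
    exact hInv2
  · rw [if_pos (by simpa using hll)]
    have hrxry : rx ≠ ry := by
      intro hc
      apply hll
      rw [← hlabrx, ← hlabry, hc]
    set li := lab.getD i 0 with hlid
    set lj := lab.getD j 0 with hljd
    set f : Nat → Nat := fun l => if l = lj then li else l with hfd
    obtain ⟨h1₂, h2₂, h3₂, ⟨d2, hd2⟩, h5₂, h6₂⟩ := hInv2
    have hlab : lab.length = n := h2₂
    have hlabB : ∀ z, z < n → (lab.map f).getD z 0 = f (lab.getD z 0) := by
      intro z hz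
      exact pvGetD_map_nat lab f (by omega)
    have hget : ∀ z, (p2.set rx ry).getD z 0 = if z = rx then ry else p2.getD z 0 := by
      intro z
      rw [pvGetD_set]
      by_cases hz : z = rx
      · rw [if_pos ⟨hz, by omega⟩, if_pos hz]
      · rw [if_neg (by intro hc; exact hz hc.1), if_neg hz]
    rw [hUeq]
    refine ⟨by simpa using h1₂, by simpa using hlab, ?_, ?_, ?_, ?_⟩
    · intro z hz
      rw [hget]
      split_ifs with h
      · exact hrylt
      · exact h3₂ z hz
    · refine ⟨fun z => if pvRoot p2 z = rx then d2 z + d2 ry + 1 else d2 z, ?_⟩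
      intro z hz hne
      by_cases h : z = rx
      · subst h
        rw [hget, if_pos rfl] at hne ⊢
        dsimp only
        rw [if_neg (by rw [pvRoot_of_fix hryfix2]; exact hne),
            if_pos (by rw [pvRoot_of_fix hrxfix2])]
        omega
      · rw [hget, if_neg h] at hne ⊢
        dsimp only
        have hroots : pvRoot p2 (p2.getD z 0) = pvRoot p2 z :=
          pvRoot_step ⟨h1₂, h2₂, h3₂, ⟨d2, hd2⟩, h5₂, h6₂⟩ hz
        rw [hroots]
        split_ifs with h'
        · have := hd2 z hz hne
          omega
        · exact hd2 z hz hne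
    · intro z hz
      by_cases h : z = rx
      · subst h
        rw [hget, if_pos rfl, hlabB ry hrylt, hlabB rx hrxlt, hlabry, hlabrx]
        rw [hfd]
        dsimp only
        rw [if_pos rfl, ite_self]
      · rw [hget, if_neg h, hlabB _ (h3₂ z hz), hlabB z hz, h5₂ z hz]
    · intro u v hu hv hfu hfv hlabuv
      have hurx : u ≠ rx := by
        intro hc
        rw [hget, if_pos hc] at hfu
        exact hrxry (hc ▸ hfu.symm) |>.elim
      have hvrx : v ≠ rx := by
        intro hc
        rw [hget, if_pos hc] at hfv
        exact hrxry (hc ▸ hfv.symm) |>.elim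
      rw [hget, if_neg hurx] at hfu
      rw [hget, if_neg hvrx] at hfv
      rw [hlabB u hu, hlabB v hv] at hlabuv
      rw [hfd] at hlabuv
      simp only at hlabuv
      by_cases hu' : lab.getD u 0 = lj
      · by_cases hv' : lab.getD v 0 = lj
        · exact h6₂ u v hu hv hfu hfv (by rw [hu', hv'])
        · rw [if_pos hu', if_neg hv'] at hlabuv
          exfalso
          apply hvrx
          exact h6₂ v rx hv hrxlt hfv hrxfix2 (by rw [← hlabuv, hlabrx])
      · by_cases hv' : lab.getD v 0 = lj
        · rw [if_neg hu', if_pos hv'] at hlabuv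
          exfalso
          apply hurx
          exact h6₂ u rx hu hrxlt hfu hrxfix2 (by rw [hlabuv, hlabrx])
        · rw [if_neg hu', if_neg hv'] at hlabuv
          exact h6₂ u v hu hv hfu hfv hlabuv

theorem pvGetD_range {n x : Nat} (hx : x < n) : (List.range n).getD x 0 = x := by
  rw [List.getD_eq_getElem _ _ (by simpa using hx), List.getElem_range]

theorem pvInv_init (n : Nat) : pvInv (List.range n) (List.range n) n := by
  refine ⟨List.length_range, List.length_range, ?_, ⟨fun _ => 0, ?_⟩, ?_, ?_⟩
  · intro x hx
    rw [pvGetD_range hx]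
    exact hx
  · intro x hx hne
    exact absurd (pvGetD_range hx) hne
  · intro x hx
    rw [pvGetD_range hx]
    exact pvGetD_range hx
  · intro x y hx hy _ _ hl
    rw [pvGetD_range hx, pvGetD_range hy] at hl
    exact hl

theorem pvFoldRel {α σ τ : Type} (R : σ → τ → Prop) (l : List α) (f : σ → α → σ)
    (g : τ → α → τ) (h : ∀ a ∈ l, ∀ s t, R s t → R (f s a) (g t a)) :
    ∀ s t, R s t → R (l.foldl f s) (l.foldl g t) := by
  induction l with
  | nil => intro s t hst; exact hst
  | cons a l ih =>
    intro s t hst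
    exact ih (fun b hb s' t' => h b (List.mem_cons_of_mem a hb) s' t')
      (f s a) (g t a) (h a List.mem_cons_self s t hst)

theorem pvGetD_map' {α β : Type} (l : List α) (f : α → β) (dα : α) (dβ : β)
    {i : Nat} (h : i < l.length) : (l.map f).getD i dβ = f (l.getD i dα) := by
  rw [List.getD_eq_getElem _ _ (by simpa using h), List.getElem_map,
      List.getD_eq_getElem _ _ h]

theorem pvFind?_map {V : Type} (l : List (Nat × V)) (φ : Nat → Nat) (r : Nat)
    (h : ∀ kv ∈ l, (φ kv.1 = φ r ↔ kv.1 = r)) :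
    (l.map (fun kv => (φ kv.1, kv.2))).find? (fun q => q.1 == φ r)
      = Option.map (fun kv : Nat × V => (φ kv.1, kv.2)) (l.find? (fun q => q.1 == r)) := by
  induction l with
  | nil => rfl
  | cons kv t ih =>
    simp only [List.map_cons]
    by_cases hk : kv.1 = r
    · rw [List.find?_cons_of_pos (by simpa using (h kv List.mem_cons_self).mpr hk),
          List.find?_cons_of_pos (by simpa using hk)]
      rfl
    · rw [List.find?_cons_of_neg (by simpa using fun hc => hk ((h kv List.mem_cons_self).mp hc)),
          List.find?_cons_of_neg (by simpa using hk)]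
      exact ih (fun kv' hkv' => h kv' (List.mem_cons_of_mem kv hkv'))

theorem pvGet?_map {V : Type} (d1 d2 : PySem.Dict Nat V) (φ : Nat → Nat) (r : Nat)
    (hrel : d2.items = d1.items.map (fun kv => (φ kv.1, kv.2)))
    (h : ∀ kv ∈ d1.items, (φ kv.1 = φ r ↔ kv.1 = r)) :
    d2.get? (φ r) = d1.get? r := by
  show Option.map _ _ = Option.map _ _
  rw [hrel, pvFind?_map d1.items φ r h]
  cases d1.items.find? (fun q => q.1 == r) <;> rfl

theorem pvContains_map {V : Type} (d1 d2 : PySem.Dict Nat V) (φ : Nat → Nat) (r : Nat)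
    (hrel : d2.items = d1.items.map (fun kv => (φ kv.1, kv.2)))
    (h : ∀ kv ∈ d1.items, (φ kv.1 = φ r ↔ kv.1 = r)) :
    d2.contains (φ r) = d1.contains r := by
  rw [PySem.Dict.contains_eq_isSome_get?, PySem.Dict.contains_eq_isSome_get?,
      pvGet?_map d1 d2 φ r hrel h]

theorem pvInsert_map {V : Type} (d1 d2 : PySem.Dict Nat V) (φ : Nat → Nat) (r : Nat) (v : V)
    (hrel : d2.items = d1.items.map (fun kv => (φ kv.1, kv.2)))
    (h : ∀ kv ∈ d1.items, (φ kv.1 = φ r ↔ kv.1 = r)) :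
    (d2.insert (φ r) v).items = (d1.insert r v).items.map (fun kv => (φ kv.1, kv.2)) := by
  rw [PySem.Dict.items_insert, PySem.Dict.items_insert,
      pvContains_map d1 d2 φ r hrel h]
  by_cases hc : d1.contains r = true
  · rw [if_pos hc, if_pos hc, hrel, List.map_map, List.map_map]
    apply List.map_congr_left
    intro kv hkv
    simp only [Function.comp_apply]
    by_cases hk : kv.1 = r
    · rw [if_pos (by simpa using (h kv hkv).mpr hk), if_pos (by simpa using hk)]
    · rw [if_neg (by simpa using fun hc' => hk ((h kv hkv).mp hc')),
          if_neg (by simpa using hk)]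
  · rw [if_neg (by simpa using hc), if_neg (by simpa using hc), hrel, List.map_append]
    rfl

theorem pvGetD_rel {V : Type} (d1 d2 : PySem.Dict Nat V) (φ : Nat → Nat) (r : Nat) (v0 : V)
    (hrel : d2.items = d1.items.map (fun kv => (φ kv.1, kv.2)))
    (h : ∀ kv ∈ d1.items, (φ kv.1 = φ r ↔ kv.1 = r)) :
    d2.getD (φ r) v0 = d1.getD r v0 := by
  show (d2.get? (φ r)).getD v0 = (d1.get? r).getD v0
  rw [pvGet?_map d1 d2 φ r hrel h]


theorem pvRaw_eq (groups : List (String × String × List (String × Int))) (min_alphabet : Int) :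
    pvRawA groups min_alphabet = pvRawB groups min_alphabet := by
  rw [pvRawA, pvRawB]
  have h := PySem.List.foldl_append_if
    (fun it : (String × String) × List (String × Int) => decide (min_alphabet ≤ (it.2.length : Int)))
    (fun it : (String × String) × List (String × Int) => (it.1.1, it.1.2, it.2))
    (pvItems groups) []
  simp only [decide_eq_true_eq] at h
  rw [h]
  rfl

theorem pvZipIdx_eq {α : Type} (l : List α) (dflt : α) :
    l.zipIdx = (List.range l.length).map (fun i => (l.getD i dflt, i)) := by
  apply List.ext_getElem
  · simp
  · intro i h1 h2
    have hi : i < l.length := by simpa using h1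
    simp only [List.getElem_zipIdx, List.getElem_map, List.getElem_range]
    rw [List.getD_eq_getElem _ _ hi]
    simp

theorem pvPhase2 (raw : List (String × String × List (String × Int))) :
    pvInv (pvLoopA raw) (pvLoopB (raw.map pvAlpha) raw.length) raw.length := by
  rw [pvLoopA, pvLoopB]
  set n := raw.length with hn
  refine pvFoldRel (fun p lab => pvInv p lab n) (List.range n) _ _ ?_ _ _ (pvInv_init n)
  intro i hi p lab hR
  have hilt : i < n := List.mem_range.mp hi
  refine pvFoldRel (fun p lab => pvInv p lab n) (List.range' (i+1) (n - (i+1))) _ _ ?_ p lab hR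
  intro j hj p' lab' hR'
  have hjlt : j < n := by
    have := List.mem_range'_1.mp hj
    omega
  have hki : (raw.map pvAlpha).getD i [] = pvAlpha (raw.getD i pvDfltPat) :=
    pvGetD_map' raw pvAlpha pvDfltPat [] (by omega)
  have hkj : (raw.map pvAlpha).getD j [] = pvAlpha (raw.getD j pvDfltPat) :=
    pvGetD_map' raw pvAlpha pvDfltPat [] (by omega)
  dsimp only
  rw [hki, hkj]
  by_cases hc : 2 ≤ PySem.Set.len
      (PySem.Set.inter (pvAlpha (raw.getD i pvDfltPat)) (pvAlpha (raw.getD j pvDfltPat)))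
  · rw [if_pos hc, if_pos hc]
    exact pvStep hR' hilt hjlt
  · rw [if_neg hc, if_neg hc]
    exact hR'

theorem pvPhase3 (raw : List (String × String × List (String × Int))) (p lab : List Nat)
    (hInv : pvInv p lab raw.length) :
    (pvClustersA raw p).1.values = (pvOutB raw lab).values := by
  rw [pvClustersA, pvOutB, pvZipIdx_eq raw pvDfltPat, List.foldl_map]
  set n := raw.length with hn
  set mk : Nat × List (String × String × List (String × Int)) →
      Nat × List (String × String × List (String × Int)) :=
    fun kv => (lab.getD kv.1 0, kv.2) with hmk
  set R : (PySem.Dict Nat (List (String × String × List (String × Int))) × List Nat) →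
      PySem.Dict Nat (List (String × String × List (String × Int))) → Prop :=
    fun st d2 =>
      pvInv st.2 lab n ∧ d2.items = st.1.items.map mk ∧
      ∀ kv ∈ st.1.items, kv.1 < n ∧ st.2.getD kv.1 0 = kv.1 with hR
  set fA : (PySem.Dict Nat (List (String × String × List (String × Int))) × List Nat) →
      Nat → (PySem.Dict Nat (List (String × String × List (String × Int))) × List Nat) :=
    fun st y =>
      let f := pvFind st.2 (raw.getD y pvDfltPat, y).2
      (st.1.modify f.1 [] (· ++ [(raw.getD y pvDfltPat, y).1]), f.2) with hfA
  set gB : PySem.Dict Nat (List (String × String × List (String × Int))) →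
      Nat → PySem.Dict Nat (List (String × String × List (String × Int))) :=
    fun d i =>
      let k := lab.getD i 0
      d.insert k (d.getD k [] ++ [raw.getD i pvDfltPat]) with hgB
  have hstep : ∀ i ∈ List.range n, ∀ st d2, R st d2 → R (fA st i) (gB d2 i) := by
    intro i hi st d2 hRst
    obtain ⟨hInvc, hrel, hkeys⟩ := hRst
    have hilt : i < n := List.mem_range.mp hi
    obtain ⟨p', hfeq, hInv', hfp'⟩ := pvFind_spec hInvc hilt
    set r := pvRoot st.2 i with hr
    have hrlt : r < n := pvRoot_lt hInvc hilt
    have hrfix' : p'.getD r 0 = r := hfp' r hrlt (pvRoot_isFix hInvc hilt)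
    have hphi : lab.getD i 0 = lab.getD r 0 := (pvLab_root hInvc hilt).symm
    have hpoint : ∀ kv ∈ st.1.items,
        ((fun k => lab.getD k 0) kv.1 = (fun k => lab.getD k 0) r ↔ kv.1 = r) := by
      intro kv hkv
      obtain ⟨hklt, hkfix⟩ := hkeys kv hkv
      have hkfix' : p'.getD kv.1 0 = kv.1 := hfp' kv.1 hklt hkfix
      constructor
      · intro he
        exact hInv'.2.2.2.2.2 kv.1 r hklt hrlt hkfix' hrfix' he
      · intro he
        rw [he]
    have hAred : fA st i = (st.1.modify r [] (· ++ [raw.getD i pvDfltPat]), p') := by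
      rw [hfA]
      dsimp only
      rw [hfeq]
    rw [hAred, hR]
    refine ⟨hInv', ?_, ?_⟩
    · show (gB d2 i).items
        = (st.1.insert r (st.1.getD r [] ++ [raw.getD i pvDfltPat])).items.map mk
      rw [hgB]
      dsimp only
      rw [hphi]
      rw [pvGetD_rel st.1 d2 (fun k => lab.getD k 0) r [] hrel hpoint]
      exact pvInsert_map st.1 d2 (fun k => lab.getD k 0) r _ hrel hpoint
    · show ∀ kv ∈ (st.1.insert r (st.1.getD r [] ++ [raw.getD i pvDfltPat])).items,
        kv.1 < n ∧ p'.getD kv.1 0 = kv.1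
      intro kv hkv
      rw [PySem.Dict.items_insert] at hkv
      by_cases hc : st.1.contains r = true
      · rw [if_pos hc] at hkv
        obtain ⟨kv0, hkv0, hkv0e⟩ := List.mem_map.mp hkv
        by_cases hk0 : kv0.1 = r
        · rw [if_pos (by simpa using hk0)] at hkv0e
          rw [← hkv0e]
          exact ⟨hrlt, hrfix'⟩
        · rw [if_neg (by simpa using hk0)] at hkv0e
          rw [← hkv0e]
          obtain ⟨hklt, hkfix⟩ := hkeys kv0 hkv0
          exact ⟨hklt, hfp' kv0.1 hklt hkfix⟩
      · rw [if_neg (by simpa using hc)] at hkv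
        rcases List.mem_append.mp hkv with h | h
        · obtain ⟨hklt, hkfix⟩ := hkeys kv h
          exact ⟨hklt, hfp' kv.1 hklt hkfix⟩
        · have hkveq : kv = (r, st.1.getD r [] ++ [raw.getD i pvDfltPat]) := by simpa using h
          rw [hkveq]
          exact ⟨hrlt, hrfix'⟩
  have main := pvFoldRel R (List.range n) fA gB hstep (PySem.Dict.empty, p) PySem.Dict.empty
    (by rw [hR]; exact ⟨hInv, rfl, by intro kv hkv; cases hkv⟩)
  rw [hR] at main
  obtain ⟨_, hrel, _⟩ := main
  show PySem.Dict.values (List.foldl fA (PySem.Dict.empty, p) (List.range n)).1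
    = PySem.Dict.values (List.foldl gB PySem.Dict.empty (List.range n))
  rw [PySem.Dict.values, PySem.Dict.values, hrel, List.map_map]
  rfl

-- ===== VERDICT (by name: the statement is the Claim_ definition above) =====
theorem aggregate_by_alphabet_spec : Claim_equal_aggregate_by_alphabet := by
  intro groups min_alphabet _
  unfold Spec_aggregate_by_alphabet aggregate_by_alphabet aggregate_by_alphabet_alt
  rw [pvRaw_eq]
  by_cases hraw : pvRawB groups min_alphabet = []
  · rw [if_pos hraw, hraw]
    rfl
  · rw [if_neg hraw]
    exact pvPhase3 _ _ _ (pvPhase2 (pvRawB groups min_alphabet))
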